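-- pv_equiv track=rewrite | github.com/GarfieldJiang/CLRS | DP/problem_15_4.py | __next_line_break_flags
-- ===== SOURCE A (Python) =====
-- def __next_line_break_flags(line_break_flags, n):
--     true_count = 0
--     carry = True
--     for i in range(n - 1):
--         if carry:
--             line_break_flags[i] = not line_break_flags[i]
--
--         if line_break_flags[i]:
--             true_count += 1
--             carry = False
--
--     return true_count
-- ===== SOURCE B (Python) =====
-- def __next_line_break_flags(line_break_flags, n):
--     # Encode the first n-1 flags as an integer (bit i = flag i), do the
--     # increment as arithmetic modulo 2^(n-1), write the bits back, and
--     # return the popcount of the new value.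
--     m = n - 1
--     if m <= 0:
--         return 0
--     v = 0
--     for i in range(m):
--         if line_break_flags[i]:
--             v += 1 << i
--     v = (v + 1) % (1 << m)
--     for i in range(m):
--         line_break_flags[i] = bool((v >> i) & 1)
--     c = 0
--     while v:
--         c += v & 1
--         v >>= 1
--     return c
-- ===== Notes on version B (the rewrite author's own statement) =====
-- stated objective: alternative
-- what changed: B replaces A's carry-propagation loop by integer arithmetic: it encodes the first n-1 flags as a number (bit i = flag i), computes the increment as (v+1) mod 2^(n-1), writes the bits back, and returns the popcount of the new value.
import Mathlib
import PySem

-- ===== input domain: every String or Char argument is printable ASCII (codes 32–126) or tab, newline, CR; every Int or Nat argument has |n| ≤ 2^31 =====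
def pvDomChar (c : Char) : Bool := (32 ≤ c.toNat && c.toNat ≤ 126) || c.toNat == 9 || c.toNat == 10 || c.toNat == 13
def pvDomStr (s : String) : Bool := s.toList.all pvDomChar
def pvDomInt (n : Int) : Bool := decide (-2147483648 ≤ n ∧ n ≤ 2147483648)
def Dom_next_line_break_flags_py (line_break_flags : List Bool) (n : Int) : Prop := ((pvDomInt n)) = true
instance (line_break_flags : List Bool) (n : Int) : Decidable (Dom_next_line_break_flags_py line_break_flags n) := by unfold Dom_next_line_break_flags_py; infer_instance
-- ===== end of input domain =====

-- B replaces A's carry-propagation loop by integer arithmetic: encode the first n-1 flags as a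
-- number, increment it modulo 2^(n-1), write the bits back and return its popcount. Both Pythons
-- mutate line_break_flags to the same final values; the theorems compare the return value only.

-- ===== PORT A =====
-- A's for-loop over range(n-1) with state (list, true_count, carry); set/getD are exact where the
-- indices 0..n-2 are in range, i.e. on Pre_ (outside it Python raises IndexError).
def aGo (lbf : List Bool) (cnt : Int) (carry : Bool) (i stop : Nat) : Int :=
  if _h : i < stop then
    let lbf' := if carry then lbf.set i (!(lbf.getD i false)) else lbf
    if lbf'.getD i false then aGo lbf' (cnt + 1) false (i + 1) stop
    else aGo lbf' cnt carry (i + 1) stop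
  else cnt
termination_by stop - i

def next_line_break_flags_py (line_break_flags : List Bool) (n : Int) : Int :=
  aGo line_break_flags 0 true 0 (n - 1).toNat

-- ===== PORT B =====
-- popcount loop of Source B: while v: c += v & 1; v >>= 1  (v & 1 = v % 2, v >> 1 = v / 2 on Nat)
def pcnt (v : Nat) : Int :=
  if _h : v = 0 then 0 else ((v % 2 : Nat) : Int) + pcnt (v / 2)
termination_by v
decreasing_by exact Nat.div_lt_self (Nat.pos_of_ne_zero _h) (by omega)

-- Source B's encoding loop: v += 1 << i for each true flag among the first m; getD is exact on Pre_.
def bEnc (lbf : List Bool) (m : Nat) : Nat :=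
  (List.range m).foldl (fun acc i => if lbf.getD i false then acc + (1 <<< i) else acc) 0

-- Source B: early return 0 when n-1 <= 0; else encode, increment mod 2^(n-1), popcount.
-- (Source B's write-back loop mutates the Python list only; it does not affect the return value.)
def next_line_break_flags_py_alt (line_break_flags : List Bool) (n : Int) : Int :=
  if n - 1 ≤ 0 then 0
  else pcnt ((bEnc line_break_flags (n - 1).toNat + 1) % (1 <<< (n - 1).toNat))

-- ===== PRECONDITION & SPEC =====
-- Pre_ excludes exactly the inputs where both Pythons raise IndexError: n - 1 > len(line_break_flags).
def Pre_next_line_break_flags_py (line_break_flags : List Bool) (n : Int) : Prop :=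
  n - 1 ≤ (line_break_flags.length : Int)
instance (line_break_flags : List Bool) (n : Int) : Decidable (Pre_next_line_break_flags_py line_break_flags n) := by unfold Pre_next_line_break_flags_py; infer_instance

def pvWitness_next_line_break_flags_py : List Bool × Int := ([true, false, false], 4)

def Spec_next_line_break_flags_py (line_break_flags : List Bool) (n : Int) (out : Int) : Prop := out = next_line_break_flags_py_alt line_break_flags n
instance (line_break_flags : List Bool) (n : Int) (out : Int) : Decidable (Spec_next_line_break_flags_py line_break_flags n out) := by unfold Spec_next_line_break_flags_py; infer_instance

-- ===== CLAIM (what is proved, stated in full; the proofs are below) =====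
def Claim_equal_next_line_break_flags_py : Prop := ∀ (line_break_flags : List Bool) (n : Int), Dom_next_line_break_flags_py line_break_flags n → Pre_next_line_break_flags_py line_break_flags n → Spec_next_line_break_flags_py line_break_flags n (next_line_break_flags_py line_break_flags n)

-- ===== LEMMAS AND PROOFS =====

-- value of the bit suffix lbf[i..m-1], LSB first
def V (lbf : List Bool) (i m : Nat) : Nat :=
  if _h : i < m then (if lbf.getD i false then 1 else 0) + 2 * V lbf (i + 1) m else 0
termination_by m - i

theorem getD_set_self (l : List Bool) (i : Nat) (b : Bool) (h : i < l.length) :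
    (l.set i b).getD i false = b := by
  simp [List.getD, List.getElem?_set_self h]

theorem getD_set_ne (l : List Bool) (i j : Nat) (b : Bool) (h : i ≠ j) :
    (l.set i b).getD j false = l.getD j false := by
  simp [List.getD, List.getElem?_set_ne h]

theorem V_set_lt (lbf : List Bool) (k : Nat) (b : Bool) :
    ∀ (fuel i m : Nat), m - i ≤ fuel → k < i → V (lbf.set k b) i m = V lbf i m := by
  intro fuel
  induction fuel with
  | zero => intro i m hf hk; rw [V, dif_neg (by omega), V, dif_neg (by omega)]
  | succ fuel ih =>
    intro i m hf hk
    by_cases h : i < m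
    · conv_lhs => rw [V, dif_pos h]
      conv_rhs => rw [V, dif_pos h]
      rw [getD_set_ne _ _ _ _ (by omega), ih (i + 1) m (by omega) (by omega)]
    · conv_lhs => rw [V, dif_neg h]
      conv_rhs => rw [V, dif_neg h]

theorem V_lt (lbf : List Bool) :
    ∀ (fuel i m : Nat), m - i ≤ fuel → V lbf i m < 2 ^ (m - i) := by
  intro fuel
  induction fuel with
  | zero => intro i m hf; rw [V, dif_neg (by omega)]; positivity
  | succ fuel ih =>
    intro i m hf
    by_cases h : i < m
    · have h2 : 2 ^ (m - i) = 2 * 2 ^ (m - (i + 1)) := by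
        rw [← pow_succ']; congr 1; omega
      have hW := ih (i + 1) m (by omega)
      conv_lhs => rw [V, dif_pos h]
      rw [h2]
      generalize hP : 2 ^ (m - (i + 1)) = P at hW ⊢
      split <;> omega
    · rw [V, dif_neg h]; positivity

theorem pcnt_bit (b : Bool) (w : Nat) :
    pcnt ((if b then 1 else 0) + 2 * w) = (if b then 1 else 0) + pcnt w := by
  cases b with
  | true =>
    simp only [if_true]
    rw [pcnt, dif_neg (by omega)]
    have h1 : (1 + 2 * w) % 2 = 1 := by omega
    have h2 : (1 + 2 * w) / 2 = w := by omega
    simp [h1, h2]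
  | false =>
    simp only [Bool.false_eq_true, if_false, zero_add]
    by_cases hw : w = 0
    · simp [hw, pcnt]
    · rw [pcnt, dif_neg (by omega)]
      have h1 : 2 * w % 2 = 0 := by omega
      have h2 : 2 * w / 2 = w := by omega
      simp [h1, h2]

theorem aGo_false (lbf : List Bool) :
    ∀ (fuel i m : Nat), m - i ≤ fuel →
      ∀ cnt : Int, aGo lbf cnt false i m = cnt + pcnt (V lbf i m) := by
  intro fuel
  induction fuel with
  | zero =>
    intro i m hf cnt
    rw [aGo, dif_neg (by omega), V, dif_neg (by omega)]
    simp [pcnt]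
  | succ fuel ih =>
    intro i m hf cnt
    by_cases h : i < m
    · rw [aGo]
      simp only [dif_pos h, if_neg (by simp : ¬ (false = true))]
      rw [V, dif_pos h]
      by_cases hb : lbf.getD i false = true
      · rw [if_pos hb, ih (i + 1) m (by omega), hb, if_pos rfl,
            show ((1 : Nat) + 2 * V lbf (i+1) m) = (if true then 1 else 0) + 2 * V lbf (i+1) m
              by simp,
            pcnt_bit]
        simp; ring
      · rw [if_neg hb, ih (i + 1) m (by omega), if_neg hb,
            show ((0 : Nat) + 2 * V lbf (i+1) m) = (if false then 1 else 0) + 2 * V lbf (i+1) m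
              by simp,
            pcnt_bit]
        simp
    · rw [aGo, dif_neg h, V, dif_neg h]
      simp [pcnt]

theorem aGo_true (m : Nat) : ∀ (fuel i : Nat) (lbf : List Bool), m ≤ lbf.length → m - i ≤ fuel →
    ∀ cnt : Int, aGo lbf cnt true i m = cnt + pcnt ((V lbf i m + 1) % 2 ^ (m - i)) := by
  intro fuel
  induction fuel with
  | zero =>
    intro i lbf _ hk cnt
    rw [aGo, dif_neg (by omega), V, dif_neg (by omega), show m - i = 0 by omega]
    simp [pcnt]
  | succ fuel ih =>
    intro i lbf hm hk cnt
    by_cases h : i < m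
    · have hil : i < lbf.length := by omega
      have h2 : 2 ^ (m - i) = 2 * 2 ^ (m - (i + 1)) := by
        rw [← pow_succ']; congr 1; omega
      rw [aGo]
      simp only [dif_pos h, if_true]
      rw [getD_set_self _ _ _ hil]
      conv_rhs => rw [V, dif_pos h]
      by_cases hb : lbf.getD i false = true
      · -- bit was true: flipped to false, carry continues at i+1
        simp only [hb, Bool.not_true, Bool.false_eq_true, if_false, if_true]
        rw [ih (i + 1) _ (by simpa using hm) (by omega),
            V_set_lt _ _ _ m (i + 1) m (by omega) (by omega)]
        rw [show (1 + 2 * V lbf (i+1) m + 1) = 2 * (V lbf (i+1) m + 1) by ring,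
            h2, Nat.mul_mod_mul_left,
            show 2 * ((V lbf (i+1) m + 1) % 2 ^ (m - (i+1)))
              = (if false then 1 else 0) + 2 * ((V lbf (i+1) m + 1) % 2 ^ (m - (i+1))) by simp,
            pcnt_bit]
        simp
      · -- bit was false: flipped to true, counted, carry cleared
        have hb' : lbf.getD i false = false := by
          cases hx : lbf.getD i false
          · rfl
          · exact absurd hx hb
        simp only [hb', Bool.not_false, Bool.false_eq_true, if_false, if_true]
        rw [aGo_false _ m (i + 1) m (by omega),
            V_set_lt _ _ _ m (i + 1) m (by omega) (by omega)]
        have hW := V_lt lbf m (i + 1) m (by omega)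
        have hlt : 0 + 2 * V lbf (i+1) m + 1 < 2 ^ (m - i) := by
          rw [h2]
          generalize hP : 2 ^ (m - (i + 1)) = P at hW ⊢
          omega
        rw [Nat.mod_eq_of_lt hlt,
            show (0 + 2 * V lbf (i+1) m + 1) = (if true then 1 else 0) + 2 * V lbf (i+1) m by
              simp; omega,
            pcnt_bit]
        simp; ring
    · rw [aGo, dif_neg h, V, dif_neg h, show m - i = 0 by omega]
      simp [pcnt]

theorem foldl_V (lbf : List Bool) (k : Nat) :
    ∀ (i : Nat) (acc : Nat),
      (List.range' i k).foldl (fun acc j => if lbf.getD j false then acc + (1 <<< j) else acc) acc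
        = acc + 2 ^ i * V lbf i (i + k) := by
  induction k with
  | zero => intro i acc; simp [V]
  | succ k ih =>
    intro i acc
    rw [List.range'_succ, List.foldl_cons, ih]
    conv_rhs => rw [V, dif_pos (by omega : i < i + (k + 1))]
    rw [show i + 1 + k = i + (k + 1) by omega, Nat.shiftLeft_eq, one_mul]
    split <;> ring

-- ===== VERDICT (by name: the statement is the Claim_ definition above) =====
theorem next_line_break_flags_py_spec : Claim_equal_next_line_break_flags_py := by
  intro lbf n _ hpre
  show next_line_break_flags_py lbf n = next_line_break_flags_py_alt lbf n
  unfold next_line_break_flags_py next_line_break_flags_py_alt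
  by_cases h : n - 1 ≤ 0
  · rw [if_pos h]
    have : (n - 1).toNat = 0 := by omega
    rw [this, aGo, dif_neg (by omega)]
  · rw [if_neg h]
    have hm : (n - 1).toNat ≤ lbf.length := by
      unfold Pre_next_line_break_flags_py at hpre; omega
    rw [aGo_true _ ((n - 1).toNat) 0 lbf hm (by omega)]
    unfold bEnc
    rw [List.range_eq_range', foldl_V, Nat.shiftLeft_eq, one_mul]
    simp
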